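-- pv_equiv track=rewrite | github.com/amon1aco/lcc-2ano | 2º Semestre/Lab. Algoritmia 2/treino2.py | build_aux
-- ===== SOURCE A (Python) =====
-- def build_aux(arestas,adj):
--     if(len(arestas) > 1):
--         for i in range(len(arestas)):
--             for j in range(i,len(arestas)):
--                 if(arestas[i] != arestas[j]):
--                     if arestas[i] not in adj:
--                         adj[arestas[i]] = set()
--                     if arestas[j] not in adj:
--                         adj[arestas[j]] = set()
--
--                     adj[arestas[i]].add(arestas[j])
--                     adj[arestas[j]].add(arestas[i])
--     else:
--         adj[arestas[0]] = set()
--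
--     return adj
-- ===== SOURCE B (Python) =====
-- def build_aux(arestas, adj):
--     if len(arestas) > 1:
--         distinct = list(dict.fromkeys(arestas))
--         for v in distinct:
--             others = [w for w in distinct if w != v]
--             if others:
--                 adj.setdefault(v, set()).update(others)
--     else:
--         adj[arestas[0]] = set()
--     return adj
-- ===== Notes on version B (the rewrite author's own statement) =====
-- stated objective: faster
-- what changed: Replaces the quadratic double index loop over all pairs of list entries by an order-preserving dedup (dict.fromkeys) followed by one per-distinct-node bulk set union, so repeated values are processed once instead of once per pair.
import Mathlib
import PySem

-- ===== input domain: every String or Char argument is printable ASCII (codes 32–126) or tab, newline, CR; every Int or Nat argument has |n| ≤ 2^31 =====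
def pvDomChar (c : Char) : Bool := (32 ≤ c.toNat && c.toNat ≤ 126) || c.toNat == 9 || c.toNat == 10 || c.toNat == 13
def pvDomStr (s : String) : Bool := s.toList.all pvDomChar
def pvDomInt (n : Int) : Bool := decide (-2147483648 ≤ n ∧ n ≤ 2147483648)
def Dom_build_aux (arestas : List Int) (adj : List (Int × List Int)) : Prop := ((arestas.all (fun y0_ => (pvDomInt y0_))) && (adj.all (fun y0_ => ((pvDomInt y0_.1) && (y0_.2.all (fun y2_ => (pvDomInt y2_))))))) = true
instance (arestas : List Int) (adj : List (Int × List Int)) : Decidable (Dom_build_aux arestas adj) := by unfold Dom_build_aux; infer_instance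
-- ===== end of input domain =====

-- B replaces A's pairwise double index loop by an order-preserving dedup followed by one
-- per-distinct-node bulk set union; measured faster on duplicate-heavy lists. Both Pythons mutate
-- adj in place identically; the claim is about the returned dict.


-- ===== PORT A =====
-- body of A's inner `if arestas[i] != arestas[j]` block; `adj[arestas[i]].add(..)` is exact as
-- `modify _ [] (Set.add ..)` because the two preceding ifs guarantee the key is present.

def pairStep (d : PySem.Dict Int (List Int)) (x y : Int) : PySem.Dict Int (List Int) :=
  if x ≠ y then
    let d1 := if d.contains x then d else d.insert x []
    let d2 := if d1.contains y then d1 else d1.insert y []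
    let d3 := d2.modify x [] (fun s => PySem.Set.add s y)
    d3.modify y [] (fun s => PySem.Set.add s x)
  else d


def build_aux (arestas : List Int) (adj : List (Int × List Int)) : List (Int × List Int) :=
  let d : PySem.Dict Int (List Int) := PySem.Dict.mk adj
  if 1 < (arestas.length : Int) then
    ((PySem.List.pyRange 0 (arestas.length : Int) 1).foldl (fun d i =>
      (PySem.List.pyRange i (arestas.length : Int) 1).foldl (fun d j =>
        pairStep d (PySem.List.pyGetD arestas i 0) (PySem.List.pyGetD arestas j 0)) d) d).items
  else (PySem.Dict.insert d (PySem.List.pyGetD arestas 0 0) []).items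

-- ===== PORT B =====
def build_aux_alt (arestas : List Int) (adj : List (Int × List Int)) : List (Int × List Int) :=
  let d : PySem.Dict Int (List Int) := PySem.Dict.mk adj
  if 1 < (arestas.length : Int) then
    let distinct := PySem.List.dedup arestas
    (distinct.foldl (fun d v =>
      let others := distinct.filter (fun w => w != v)
      if others.isEmpty then d
      else PySem.Dict.modify (PySem.Dict.setdefault d v []) v []
            (fun s => PySem.Set.update s others)) d).items
  else (PySem.Dict.insert d (PySem.List.pyGetD arestas 0 0) []).items

-- ===== PRECONDITION & SPEC =====
-- Pre_ excludes the empty list, on which both Pythons raise IndexError, and association lists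
-- with duplicate keys, which do not represent a Python dict (the only adj A can receive).
def Pre_build_aux (arestas : List Int) (adj : List (Int × List Int)) : Prop :=
  arestas ≠ [] ∧ (adj.map Prod.fst).Nodup
instance (arestas : List Int) (adj : List (Int × List Int)) : Decidable (Pre_build_aux arestas adj) := by unfold Pre_build_aux; infer_instance

def pvWitness_build_aux : List Int × (List (Int × List Int)) := ([1, 2, 1], [(5, [1])])

def Spec_build_aux (arestas : List Int) (adj : List (Int × List Int)) (out : List (Int × List Int)) : Prop := out = build_aux_alt arestas adj
instance (arestas : List Int) (adj : List (Int × List Int)) (out : List (Int × List Int)) : Decidable (Spec_build_aux arestas adj out) := by unfold Spec_build_aux; infer_instance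

-- ===== CLAIM (what is proved, stated in full; the proofs are below) =====
def Claim_equal_build_aux : Prop := ∀ (arestas : List Int) (adj : List (Int × List Int)), Dom_build_aux arestas adj → Pre_build_aux arestas adj → Spec_build_aux arestas adj (build_aux arestas adj)

-- ===== LEMMAS AND PROOFS =====
theorem pairStep_self (d : PySem.Dict Int (List Int)) (x : Int) : pairStep d x x = d := by
  simp [pairStep]

theorem getD_not_contains (d : PySem.Dict Int (List Int)) (k : Int) (h : d.contains k = false) :
    d.getD k [] = [] := by
  simp [PySem.Dict.getD, (PySem.Dict.get?_eq_none_iff_contains d k).2 h]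

theorem getD_pairStep (d : PySem.Dict Int (List Int)) (x y : Int) (hxy : x ≠ y) (k : Int) :
    (pairStep d x y).getD k [] =
      if k = x then PySem.Set.add (d.getD x []) y
      else if k = y then PySem.Set.add (d.getD y []) x
      else d.getD k [] := by
  simp only [pairStep, if_pos hxy, PySem.Dict.modify]
  split_ifs with h1 h2 h2 <;>
    rcases eq_or_ne k x with rfl | hkx <;> rcases eq_or_ne k y with rfl | hky <;>
      first
      | exact absurd rfl hxy
      | simp_all [PySem.Dict.getD_insert, getD_not_contains, PySem.Dict.contains_insert, hxy, Ne.symm hxy]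

theorem contains_pairStep (d : PySem.Dict Int (List Int)) (x y : Int) (hxy : x ≠ y) (k : Int) :
    (pairStep d x y).contains k = (k == x || k == y || d.contains k) := by
  simp only [pairStep, if_pos hxy, PySem.Dict.modify]
  split_ifs with h1 h2 h2 <;>
    simp_all [PySem.Dict.contains_insert] <;>
      cases hk1 : (k == x) <;> cases hk2 : (k == y) <;> simp_all

theorem nodup_keys_pairStep (d : PySem.Dict Int (List Int)) (x y : Int)
    (hk : d.keys.Nodup) : (pairStep d x y).keys.Nodup := by
  rcases eq_or_ne x y with rfl | hxy
  · simpa [pairStep_self]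
  simp only [pairStep, if_pos hxy, PySem.Dict.modify]
  split_ifs <;>
    repeat' apply PySem.Dict.nodup_keys_insert
  all_goals exact hk

theorem getD_of_mem_items (d : PySem.Dict Int (List Int)) {p : Int × List Int}
    (hp : p ∈ d.items) (hk : d.keys.Nodup) : d.getD p.1 [] = p.2 := by
  have := PySem.Dict.get?_of_mem_items (d := d) (k := p.1) (v := p.2) (by simpa using hp) hk
  simp [PySem.Dict.getD, this]

theorem not_contains_ne (d : PySem.Dict Int (List Int)) (k : Int)
    (h : d.contains k = false) : ∀ p ∈ d.items, p.1 ≠ k := by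
  intro p hp
  simp only [PySem.Dict.contains, List.any_eq_false] at h
  simpa using h p hp

theorem items_pairStep (d : PySem.Dict Int (List Int)) (x y : Int) (hxy : x ≠ y)
    (hk : d.keys.Nodup) :
    (pairStep d x y).items =
      d.items.map (fun p => if p.1 == x then (x, PySem.Set.add p.2 y)
                            else if p.1 == y then (y, PySem.Set.add p.2 x) else p)
      ++ ((if d.contains x then [] else [(x, ([y] : List Int))])
       ++ (if d.contains y then [] else [(y, ([x] : List Int))])) := by
  have hyx : y ≠ x := Ne.symm hxy
  simp only [pairStep, if_pos hxy, PySem.Dict.modify]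
  by_cases hx : d.contains x = true <;> by_cases hy : d.contains y = true
  · -- both present
    rw [if_pos hx, if_pos (by simpa using hy)]
    have hcx : d.contains x = true := hx
    have hc3 : (d.insert x (PySem.Set.add (d.getD x []) y)).contains y = true := by
      simp [PySem.Dict.contains_insert, hy]
    have hg3 : (d.insert x (PySem.Set.add (d.getD x []) y)).getD y [] = d.getD y [] := by
      simp [PySem.Dict.getD_insert, hyx]
    rw [hg3, PySem.Dict.items_insert_of_contains _ _ hc3,
        PySem.Dict.items_insert_of_contains _ _ hcx, List.map_map]
    simp only [hx, hy, if_pos]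
    rw [List.append_nil, List.append_nil]
    refine List.map_congr_left (fun p hp => ?_)
    obtain ⟨k, s⟩ := p
    have hval : d.getD k [] = s := getD_of_mem_items d hp hk
    rcases eq_or_ne k x with rfl | h1
    · simp [hxy, hyx, hval]
    · rcases eq_or_ne k y with rfl | h2
      · simp [h1, hval]
      · simp [h1, h2]
  · -- x present, y fresh
    have hy' : d.contains y = false := by simpa using hy
    rw [if_pos hx, if_neg hy]
    have e2x : (d.insert y ([] : List Int)).getD x [] = d.getD x [] := by
      simp [PySem.Dict.getD_insert, hxy]
    rw [e2x]
    have c2x : (d.insert y ([] : List Int)).contains x = true := by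
      simp [PySem.Dict.contains_insert, hx]
    have e3y : ((d.insert y ([] : List Int)).insert x (PySem.Set.add (d.getD x []) y)).getD y [] = [] := by
      simp [PySem.Dict.getD_insert, hyx]
    rw [e3y]
    have c3y : ((d.insert y ([] : List Int)).insert x (PySem.Set.add (d.getD x []) y)).contains y = true := by
      simp [PySem.Dict.contains_insert]
    rw [PySem.Dict.items_insert_of_contains _ _ c3y,
        PySem.Dict.items_insert_of_contains _ _ c2x,
        PySem.Dict.items_insert_of_not_contains _ _ hy',
        List.map_append, List.map_append, List.map_map]
    simp only [hx, if_pos, hy', Bool.false_eq_true, if_neg, if_false, List.append_nil]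
    have hsing : ∀ (l r : List (Int × List Int)), l = r → ∀ (t u : List (Int × List Int)), t = u → l ++ t = r ++ u := by
      intro l r h t u h2; rw [h, h2]
    refine hsing _ _ ?_ _ _ (by simp [hyx, PySem.Set.add])
    refine List.map_congr_left (fun p hp => ?_)
    obtain ⟨k, s⟩ := p
    have hval : d.getD k [] = s := getD_of_mem_items d hp hk
    have hky : k ≠ y := not_contains_ne d y hy' (k, s) hp
    rcases eq_or_ne k x with rfl | h1
    · simp [hky, hval]
    · simp [h1, hky]
  · -- x fresh, y present
    have hx' : d.contains x = false := by simpa using hx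
    rw [if_neg hx]
    have c1y : (d.insert x ([] : List Int)).contains y = true := by
      simp [PySem.Dict.contains_insert, hy]
    rw [if_pos c1y]
    have e1x : (d.insert x ([] : List Int)).getD x [] = [] := by
      simp [PySem.Dict.getD_insert]
    rw [e1x]
    have c1x : (d.insert x ([] : List Int)).contains x = true := by
      simp [PySem.Dict.contains_insert]
    have e3y : ((d.insert x ([] : List Int)).insert x (PySem.Set.add [] y)).getD y [] = d.getD y [] := by
      simp [PySem.Dict.getD_insert, hyx, hxy]
    rw [e3y]
    have c3y : ((d.insert x ([] : List Int)).insert x (PySem.Set.add [] y)).contains y = true := by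
      simp [PySem.Dict.contains_insert, hy]
    rw [PySem.Dict.items_insert_of_contains _ _ c3y,
        PySem.Dict.items_insert_of_contains _ _ c1x,
        PySem.Dict.items_insert_of_not_contains _ _ hx',
        List.map_append, List.map_append, List.map_map]
    simp only [hy, if_pos, hx', Bool.false_eq_true, if_neg, if_false, List.append_nil]
    have hsing : ∀ (l r : List (Int × List Int)), l = r → ∀ (t u : List (Int × List Int)), t = u → l ++ t = r ++ u := by
      intro l r h t u h2; rw [h, h2]
    refine hsing _ _ ?_ _ _ (by simp [hxy, hyx, PySem.Set.add])
    refine List.map_congr_left (fun p hp => ?_)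
    obtain ⟨k, s⟩ := p
    have hval : d.getD k [] = s := getD_of_mem_items d hp hk
    have hkx : k ≠ x := not_contains_ne d x hx' (k, s) hp
    rcases eq_or_ne k y with rfl | h1
    · simp [hkx, hval]
    · simp [h1, hkx]
  · -- both fresh
    have hx' : d.contains x = false := by simpa using hx
    have hy' : d.contains y = false := by simpa using hy
    rw [if_neg hx]
    have c1y : (d.insert x ([] : List Int)).contains y = false := by
      simp [PySem.Dict.contains_insert, hy', hyx]
    rw [if_neg (by simp [c1y])]
    have e2x : ((d.insert x ([] : List Int)).insert y ([] : List Int)).getD x [] = [] := by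
      simp [PySem.Dict.getD_insert, hxy]
    rw [e2x]
    have c2x : ((d.insert x ([] : List Int)).insert y ([] : List Int)).contains x = true := by
      simp [PySem.Dict.contains_insert]
    have e3y : (((d.insert x ([] : List Int)).insert y ([] : List Int)).insert x (PySem.Set.add [] y)).getD y [] = [] := by
      simp [PySem.Dict.getD_insert, hyx]
    rw [e3y]
    have c3y : (((d.insert x ([] : List Int)).insert y ([] : List Int)).insert x (PySem.Set.add [] y)).contains y = true := by
      simp [PySem.Dict.contains_insert]
    rw [PySem.Dict.items_insert_of_contains _ _ c3y,
        PySem.Dict.items_insert_of_contains _ _ c2x,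
        PySem.Dict.items_insert_of_not_contains _ _ c1y,
        PySem.Dict.items_insert_of_not_contains _ _ hx',
        List.map_append, List.map_append, List.map_append, List.map_append, List.map_map]
    simp only [hx', hy', Bool.false_eq_true, if_neg, if_false]
    have hsing : ∀ (l r t u v w : List (Int × List Int)), l = r → t = u → v = w → l ++ (t ++ v) = r ++ (u ++ w) := by
      intro l r t u v w h1 h2 h3; rw [h1, h2, h3]
    rw [List.append_assoc]
    refine hsing _ _ _ _ _ _ ?_ (by simp [hxy, hyx, PySem.Set.add]) (by simp [hxy, hyx, PySem.Set.add])
    refine List.map_congr_left (fun p hp => ?_)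
    obtain ⟨k, s⟩ := p
    have hkx : k ≠ x := not_contains_ne d x hx' (k, s) hp
    have hky : k ≠ y := not_contains_ne d y hy' (k, s) hp
    simp [hkx, hky]

def linked (d : PySem.Dict Int (List Int)) (x y : Int) : Prop :=
  y ∈ d.getD x [] ∧ x ∈ d.getD y []

theorem linked_pairStep_mono (d : PySem.Dict Int (List Int)) (u v x y : Int)
    (h : linked d x y) : linked (pairStep d u v) x y := by
  rcases eq_or_ne u v with rfl | huv
  · simpa [pairStep_self]
  obtain ⟨h1, h2⟩ := h
  constructor <;> rw [getD_pairStep d u v huv] <;> split_ifs with a b <;> simp_all [PySem.Set.mem_add]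

theorem pairStep_linked (d : PySem.Dict Int (List Int)) (x y : Int) (hxy : x ≠ y) :
    linked (pairStep d x y) x y := by
  constructor <;> rw [getD_pairStep d x y hxy] <;> simp [hxy, Ne.symm hxy, PySem.Set.mem_add]

theorem contains_of_getD_ne (d : PySem.Dict Int (List Int)) (k : Int)
    (h : d.getD k [] ≠ []) : d.contains k = true := by
  by_contra hc
  have : d.get? k = none := (PySem.Dict.get?_eq_none_iff_contains d k).2 (by simpa using hc)
  simp [PySem.Dict.getD, this] at h

theorem insert_getD_self (d : PySem.Dict Int (List Int)) (k : Int)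
    (hk : d.keys.Nodup) (hc : d.contains k = true) : d.insert k (d.getD k []) = d := by
  apply PySem.Dict.ext
  rw [PySem.Dict.items_insert_of_contains _ _ hc]
  have h0 : ∀ p ∈ d.items, (if (p.1 == k) = true then (k, d.getD k []) else p) = id p := by
    intro p hp
    obtain ⟨a, s⟩ := p
    rcases eq_or_ne a k with rfl | h1
    · simp [getD_of_mem_items d hp hk]
    · simp [h1]
  rw [List.map_congr_left h0, List.map_id]

theorem pairStep_eq_of_linked (d : PySem.Dict Int (List Int)) (x y : Int)
    (hk : d.keys.Nodup) (h : linked d x y) : pairStep d x y = d := by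
  rcases eq_or_ne x y with rfl | hxy
  · exact pairStep_self d x
  obtain ⟨h1, h2⟩ := h
  have cx : d.contains x = true := contains_of_getD_ne d x (by intro e; rw [e] at h1; simp at h1)
  have cy : d.contains y = true := contains_of_getD_ne d y (by intro e; rw [e] at h2; simp at h2)
  simp only [pairStep, if_pos hxy, PySem.Dict.modify, if_pos cx, if_pos cy]
  rw [PySem.Set.add_of_mem h1, insert_getD_self d x hk cx,
      PySem.Set.add_of_mem h2, insert_getD_self d y hk cy]

def linkRow (x : Int) (R : List Int) (d : PySem.Dict Int (List Int)) : PySem.Dict Int (List Int) :=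
  R.foldl (fun d y => pairStep d x y) d

theorem nodup_keys_linkRow (x : Int) (R : List Int) :
    ∀ (d : PySem.Dict Int (List Int)), d.keys.Nodup → (linkRow x R d).keys.Nodup := by
  induction R with
  | nil => intro d h; exact h
  | cons z R ih => intro d h; exact ih _ (nodup_keys_pairStep d x z h)

theorem linkRow_filter_of_linked (x y : Int) :
    ∀ (R : List Int) (d : PySem.Dict Int (List Int)), d.keys.Nodup → linked d x y →
      linkRow x R d = linkRow x (R.filter (fun w => w != y)) d := by
  intro R
  induction R with
  | nil => intro d _ _; rfl
  | cons z R ih =>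
    intro d hk hl
    rcases eq_or_ne z y with rfl | hzy
    · simp only [linkRow, List.foldl_cons, List.filter_cons, bne_self_eq_false, Bool.false_eq_true,
        if_false, pairStep_eq_of_linked d x z hk hl]
      exact ih d hk hl
    · have hz : (z != y) = true := by simp [hzy]
      simp only [linkRow, List.foldl_cons, List.filter_cons, hz, if_true]
      exact ih (pairStep d x z) (nodup_keys_pairStep d x z hk) (linked_pairStep_mono d x z x y hl)

theorem rowA_eq (x : Int) :
    ∀ (t : List Int) (d : PySem.Dict Int (List Int)), d.keys.Nodup →
      t.foldl (fun d y => pairStep d x y) d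
        = linkRow x ((PySem.List.dedup t).filter (fun w => w != x)) d := by
  intro t
  induction t with
  | nil => intro d _; rfl
  | cons y t ih =>
    intro d hk
    have hded : PySem.List.dedup (y :: t) = y :: (PySem.List.dedup t).filter (fun w => !(w == y)) := by
      simp [PySem.Set.ofList_cons, PySem.Set.discard]
    rcases eq_or_ne y x with rfl | hyx
    · rw [List.foldl_cons, pairStep_self, hded, List.filter_cons]
      simp only [bne_self_eq_false, Bool.false_eq_true, if_false]
      rw [List.filter_filter]
      have hh : ∀ w : Int, ((w != y) && !(w == y)) = (w != y) := by
        intro w; cases h : (w == y) <;> simp [bne, h]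
      simp only [hh]
      exact ih d hk
    · rw [List.foldl_cons, hded, List.filter_cons]
      have hyy : (y != x) = true := by simp [hyx]
      simp only [hyy]
      rw [if_pos trivial]
      show _ = linkRow x (y :: _) d
      have hstep : linkRow x (y :: ((PySem.List.dedup t).filter (fun w => !(w == y))).filter (fun w => w != x)) d
          = linkRow x (((PySem.List.dedup t).filter (fun w => !(w == y))).filter (fun w => w != x)) (pairStep d x y) := rfl
      rw [hstep]
      have hcomm : ((PySem.List.dedup t).filter (fun w => !(w == y))).filter (fun w => w != x)
          = ((PySem.List.dedup t).filter (fun w => w != x)).filter (fun w => w != y) := by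
        rw [List.filter_filter, List.filter_filter]
        apply List.filter_congr
        intro w _
        cases h1 : (w == y) <;> cases h2 : (w == x) <;> simp [bne, h1, h2]
      rw [hcomm, ← linkRow_filter_of_linked x y _ (pairStep d x y)
            (nodup_keys_pairStep d x y hk) (pairStep_linked d x y (Ne.symm hyx))]
      exact ih (pairStep d x y) (nodup_keys_pairStep d x y hk)

def linkG : List Int → PySem.Dict Int (List Int) → PySem.Dict Int (List Int)
  | [], d => d
  | x :: t, d => linkG t (linkRow x ((PySem.List.dedup t).filter (fun w => w != x)) d)

theorem A_bridge (l : List Int) :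
    ∀ (m k : Nat) (d : PySem.Dict Int (List Int)), l.length - k = m → d.keys.Nodup →
    (PySem.List.pyRange (k : Int) (l.length : Int) 1).foldl
      (fun d i => (PySem.List.pyRange i (l.length : Int) 1).foldl
        (fun d j => pairStep d (PySem.List.pyGetD l i 0) (PySem.List.pyGetD l j 0)) d) d
    = linkG (l.drop k) d := by
  intro m
  induction m with
  | zero =>
    intro k d hm hk
    have hkl : l.length ≤ k := by omega
    rw [PySem.List.pyRange_one_eq_nil (by exact_mod_cast hkl), List.foldl_nil,
        List.drop_eq_nil_of_le hkl]
    rfl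
  | succ m ih =>
    intro k d hm hk
    have hkl : k < l.length := by omega
    rw [PySem.List.pyRange_one_cons (by exact_mod_cast hkl), List.foldl_cons]
    have hinner : ∀ (e : PySem.Dict Int (List Int)),
        (PySem.List.pyRange (k : Int) (l.length : Int) 1).foldl
          (fun d j => pairStep d (PySem.List.pyGetD l (k : Int) 0) (PySem.List.pyGetD l j 0)) e
        = (l.drop k).foldl (fun d y => pairStep d (PySem.List.pyGetD l (k : Int) 0) y) e := by
      intro e
      exact PySem.List.foldl_pyRange_pyGetD' l 0
        (fun d y => pairStep d (PySem.List.pyGetD l (k : Int) 0) y) e (by positivity) |>.trans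
        (by rw [Int.toNat_natCast])
    have hget : PySem.List.pyGetD l (k : Int) 0 = l[k]'hkl := by
      rw [PySem.List.pyGetD_natCast, List.getD_eq_getElem l 0 hkl]
    have hdrop : l.drop k = l[k]'hkl :: l.drop (k + 1) := List.drop_eq_getElem_cons hkl
    rw [hinner d, hget, hdrop, List.foldl_cons, pairStep_self,
        rowA_eq (l[k]'hkl) (l.drop (k+1)) d hk]
    have hcast : ((k : Int) + 1) = ((k + 1 : Nat) : Int) := by push_cast; ring
    rw [hcast, ih (k + 1) _ (by omega)
          (nodup_keys_linkRow _ _ d hk)]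
    rfl

def keyUpdQ (Q S : List Int) (p : Int × List Int) : Int × List Int :=
  if p.1 ∈ Q then (p.1, p.2 ++ S.filter (fun w => w != p.1 && !p.2.contains w)) else p

def nfItemsQ (Q S : List Int) (L : List (Int × List Int)) : List (Int × List Int) :=
  L.map (keyUpdQ Q S)
  ++ (Q.filter (fun k => !((L.map Prod.fst).contains k))).map (fun k => (k, S.filter (fun w => w != k)))

def stepB (S : List Int) (d : PySem.Dict Int (List Int)) (v : Int) : PySem.Dict Int (List Int) :=
  if (S.filter (fun w => w != v)).isEmpty then d
  else PySem.Dict.modify (PySem.Dict.setdefault d v []) v []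
        (fun s => PySem.Set.update s (S.filter (fun w => w != v)))

theorem update_append_filter (xs : List Int) (hx : xs.Nodup) :
    ∀ s : List Int, PySem.Set.update s xs = s ++ xs.filter (fun w => !s.contains w) := by
  induction xs with
  | nil => intro s; simp [PySem.Set.update]
  | cons x xs ih =>
    intro s
    have hxs : xs.Nodup := hx.of_cons
    have hxx : x ∉ xs := by simp [List.nodup_cons] at hx; exact hx.1
    have hstep : PySem.Set.update s (x :: xs) = PySem.Set.update (PySem.Set.add s x) xs := rfl
    rw [hstep, ih hxs, List.filter_cons]
    by_cases hmem : x ∈ s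
    · rw [PySem.Set.add_of_mem hmem]
      have hthis : (!s.contains x) = false := by simp [hmem]
      simp only [hthis, Bool.false_eq_true, if_false]
    · rw [PySem.Set.add_of_not_mem hmem]
      have : (!s.contains x) = true := by simp [hmem]
      rw [this, if_pos rfl, List.append_assoc, List.singleton_append]
      congr 1
      congr 1
      apply List.filter_congr
      intro w hw
      have hwx : w ≠ x := fun h => hxx (h ▸ hw)
      simp [hwx]

theorem contains_eq_keys_contains (d : PySem.Dict Int (List Int)) (k : Int) :
    d.contains k = (d.items.map Prod.fst).contains k := by
  rcases h : d.contains k with _ | _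
  · have : d.get? k = none := (PySem.Dict.get?_eq_none_iff_contains d k).2 h
    symm
    rw [Bool.eq_false_iff]
    intro hc
    rw [List.contains_iff_mem] at hc
    obtain ⟨p, hp, hfst⟩ := List.mem_map.1 hc
    have : d.contains k = true := by
      simp only [PySem.Dict.contains, List.any_eq_true]
      exact ⟨p, hp, by simp [hfst]⟩
    rw [this] at h; cases h
  · symm
    rw [List.contains_iff_mem]
    simp only [PySem.Dict.contains, List.any_eq_true] at h
    obtain ⟨p, hp, he⟩ := h
    exact List.mem_map.2 ⟨p, hp, by simpa using he⟩

theorem nodup_keys_stepB (S : List Int) (d : PySem.Dict Int (List Int)) (v : Int)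
    (hk : d.keys.Nodup) : (stepB S d v).keys.Nodup := by
  unfold stepB
  split_ifs with h
  · exact hk
  · apply PySem.Dict.nodup_keys_insert
    by_cases hc : d.contains v = true
    · rw [PySem.Dict.setdefault_of_contains _ _ hc]; exact hk
    · rw [PySem.Dict.setdefault_of_not_contains _ _ (by simpa using hc)]
      exact PySem.Dict.nodup_keys_insert _ _ _ hk

theorem items_stepB (S : List Int) (d : PySem.Dict Int (List Int)) (v : Int)
    (hv : ((S.filter (fun w => w != v)).isEmpty) = false) (hk : d.keys.Nodup) :
    (stepB S d v).items =
      if d.contains v then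
        d.items.map (fun p => if p.1 == v then (v, PySem.Set.update p.2 (S.filter (fun w => w != v))) else p)
      else d.items ++ [(v, PySem.Set.update [] (S.filter (fun w => w != v)))] := by
  unfold stepB
  simp only [hv, Bool.false_eq_true, if_false, PySem.Dict.modify]
  by_cases hc : d.contains v = true
  · rw [if_pos hc, PySem.Dict.getD_setdefault_self, PySem.Dict.setdefault_of_contains _ _ hc,
        PySem.Dict.items_insert_of_contains _ _ hc]
    refine List.map_congr_left (fun p hp => ?_)
    obtain ⟨a, s⟩ := p
    rcases eq_or_ne a v with rfl | h1
    · simp [getD_of_mem_items d hp hk]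
    · simp [h1]
  · rw [if_neg hc, PySem.Dict.getD_setdefault_self, getD_not_contains d v (by simpa using hc),
        PySem.Dict.setdefault_of_not_contains _ _ (by simpa using hc),
        PySem.Dict.insert_insert_self,
        PySem.Dict.items_insert_of_not_contains _ _ (by simpa using hc)]

theorem filter_ne_nonempty (S : List Int) (hS : S.Nodup) (h2 : 2 ≤ S.length) (v : Int) :
    ((S.filter (fun w => w != v)).isEmpty) = false := by
  by_contra h
  rw [Bool.not_eq_false, List.isEmpty_iff, List.filter_eq_nil_iff] at h
  match S, hS, h2, h with
  | a :: b :: t, hS, _, h =>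
    have hab : a ≠ b := by
      simp only [List.nodup_cons, List.mem_cons] at hS
      exact fun e => hS.1 (Or.inl e)
    have ha := h a (by simp)
    have hb := h b (by simp)
    simp only [bne_iff_ne, Decidable.not_not] at ha hb
    exact hab (ha.trans hb.symm)

theorem filter_filter_contains (S : List Int) (s : List Int) (v : Int) :
    (S.filter (fun w => w != v)).filter (fun w => !s.contains w)
      = S.filter (fun w => w != v && !s.contains w) := by
  rw [List.filter_filter]
  apply List.filter_congr
  intro a _
  cases h1 : (a != v) <;> cases h2 : (s.contains a) <;> simp [h1, h2]

theorem fold_nf (S : List Int) (hS : S.Nodup) (h2 : 2 ≤ S.length) :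
    ∀ (Q : List Int) (d : PySem.Dict Int (List Int)), Q.Nodup → (∀ v ∈ Q, v ∈ S) → d.keys.Nodup →
      Q.foldl (stepB S) d = PySem.Dict.mk (nfItemsQ Q S d.items) := by
  intro Q
  induction Q with
  | nil =>
    intro d _ _ _
    apply PySem.Dict.ext
    unfold nfItemsQ
    have h0 : ∀ p ∈ d.items, keyUpdQ [] S p = id p := by
      intro p _; unfold keyUpdQ; simp
    rw [List.map_congr_left h0, List.map_id]
    simp
  | cons v Q' ih =>
    intro d hQ hsub hk
    have hv : v ∈ S := hsub v (by simp)
    have hvQ : v ∉ Q' := by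
      simp only [List.nodup_cons] at hQ; exact hQ.1
    have hQ' : Q'.Nodup := hQ.of_cons
    have hne := filter_ne_nonempty S hS h2 v
    rw [List.foldl_cons, ih (stepB S d v) hQ' (fun w hw => hsub w (by simp [hw]))
          (nodup_keys_stepB S d v hk)]
    apply PySem.Dict.ext
    show nfItemsQ Q' S (stepB S d v).items = nfItemsQ (v :: Q') S d.items
    rw [items_stepB S d v hne hk]
    by_cases hc : d.contains v = true
    · rw [if_pos hc]
      unfold nfItemsQ
      have hkeys : (List.map (fun p => if (p.1 == v) = true then (v, PySem.Set.update p.2 (S.filter (fun w => w != v))) else p) d.items).map Prod.fst = d.items.map Prod.fst := by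
        rw [List.map_map]
        refine List.map_congr_left (fun p _ => ?_)
        obtain ⟨a, s⟩ := p
        rcases eq_or_ne a v with rfl | h1
        · simp
        · simp [h1]
      rw [hkeys, List.map_map]
      have hfresh : (v :: Q').filter (fun k => !((d.items.map Prod.fst).contains k))
          = Q'.filter (fun k => !((d.items.map Prod.fst).contains k)) := by
        rw [List.filter_cons]
        have : (!((d.items.map Prod.fst).contains v)) = false := by
          rw [← contains_eq_keys_contains]; simp [hc]
        simp only [this, Bool.false_eq_true, if_false]
      rw [hfresh]
      congr 1
      refine List.map_congr_left (fun p _ => ?_)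
      obtain ⟨a, s⟩ := p
      simp only [Function.comp_apply]
      rcases eq_or_ne a v with rfl | h1
      · rw [if_pos (by simp)]
        unfold keyUpdQ
        rw [if_neg (by simpa using hvQ), if_pos (by simp)]
        rw [update_append_filter _ (List.Nodup.filter _ hS) s, filter_filter_contains]
      · rw [if_neg (by simp [h1])]
        unfold keyUpdQ
        simp [h1]
    · rw [if_neg hc]
      have hc' : d.contains v = false := by simpa using hc
      unfold nfItemsQ
      rw [List.map_append, List.map_append]
      have hupd : PySem.Set.update [] (S.filter (fun w => w != v)) = S.filter (fun w => w != v) := by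
        have : PySem.Set.update [] (S.filter (fun w => w != v)) = PySem.Set.ofList (S.filter (fun w => w != v)) := rfl
        rw [this, PySem.Set.ofList_eq_self_of_nodup _ (List.Nodup.filter _ hS)]
      have hmapsing : List.map (keyUpdQ Q' S) [(v, PySem.Set.update [] (S.filter (fun w => w != v)))]
          = [(v, S.filter (fun w => w != v))] := by
        unfold keyUpdQ
        simp [hvQ, hupd]
      have hkeys2 : (d.items.map Prod.fst ++ [(v, PySem.Set.update [] (S.filter (fun w => w != v)))].map Prod.fst)
          = d.items.map Prod.fst ++ [v] := by simp
      rw [hmapsing, hkeys2]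
      have hfresh2 : Q'.filter (fun k => !((d.items.map Prod.fst ++ [v]).contains k))
          = Q'.filter (fun k => !((d.items.map Prod.fst).contains k)) := by
        apply List.filter_congr
        intro a ha
        have hav : a ≠ v := fun e => hvQ (e ▸ ha)
        simp [hav]
      have hfresh3 : (v :: Q').filter (fun k => !((d.items.map Prod.fst).contains k))
          = v :: Q'.filter (fun k => !((d.items.map Prod.fst).contains k)) := by
        rw [List.filter_cons]
        have : (!((d.items.map Prod.fst).contains v)) = true := by
          rw [← contains_eq_keys_contains]; simp [hc']
        simp only [this, if_pos]
      rw [hfresh2, hfresh3]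
      have hL : List.map (keyUpdQ Q' S) d.items = List.map (keyUpdQ (v :: Q') S) d.items := by
        refine List.map_congr_left (fun p hp => ?_)
        have hav : p.1 ≠ v := not_contains_ne d v hc' p hp
        unfold keyUpdQ
        simp [hav]
      rw [hL, List.map_cons, List.append_assoc, List.singleton_append]

theorem add_eq_append_filter (s : List Int) (y : Int) :
    PySem.Set.add s y = s ++ [y].filter (fun w => !s.contains w) := by
  by_cases h : y ∈ s
  · rw [PySem.Set.add_of_mem h]; simp [h]
  · rw [PySem.Set.add_of_not_mem h]; simp [h]

def lrItems (x : Int) (R : List Int) (L : List (Int × List Int)) : List (Int × List Int) :=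
  L.map (fun p => if p.1 == x then (x, p.2 ++ R.filter (fun w => !p.2.contains w))
                  else if R.contains p.1 then (p.1, PySem.Set.add p.2 x) else p)
  ++ ((if (L.map Prod.fst).contains x then [] else [(x, R)])
   ++ (R.filter (fun w => !((L.map Prod.fst).contains w))).map (fun w => (w, [x])))

theorem pairStep_items_eq_lr (d : PySem.Dict Int (List Int)) (x w : Int) (hxw : x ≠ w)
    (hk : d.keys.Nodup) : (pairStep d x w).items = lrItems x [w] d.items := by
  rw [items_pairStep d x w hxw hk]
  unfold lrItems
  congr 1
  · refine List.map_congr_left (fun p _ => ?_)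
    obtain ⟨a, s⟩ := p
    rcases eq_or_ne a x with rfl | h1
    · simp [add_eq_append_filter]
    · rcases eq_or_ne a w with rfl | h2
      · simp [h1, add_eq_append_filter]
      · simp [h1, h2]
  · congr 1
    · rw [contains_eq_keys_contains]
    · rw [List.filter_cons]
      rcases hcw : (d.items.map Prod.fst).contains w with _ | _
      · rw [← contains_eq_keys_contains] at hcw
        simp [hcw, contains_eq_keys_contains]
      · rw [← contains_eq_keys_contains] at hcw
        simp [hcw, contains_eq_keys_contains]

theorem lr_combine (x w : Int) (R' : List Int) (hxw : x ≠ w) (hxR : x ∉ R') (hwR : w ∉ R')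
    (L : List (Int × List Int)) :
    lrItems x R'
      (L.map (fun p => if p.1 == x then (x, PySem.Set.add p.2 w)
                       else if p.1 == w then (w, PySem.Set.add p.2 x) else p)
        ++ ((if (L.map Prod.fst).contains x then [] else [(x, ([w] : List Int))])
         ++ (if (L.map Prod.fst).contains w then [] else [(w, ([x] : List Int))])))
      = lrItems x (w :: R') L := by
  have hKmap : (L.map (fun p => if p.1 == x then (x, PySem.Set.add p.2 w)
      else if p.1 == w then (w, PySem.Set.add p.2 x) else p)).map Prod.fst = L.map Prod.fst := by
    rw [List.map_map]
    refine List.map_congr_left (fun p _ => ?_)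
    obtain ⟨a, s⟩ := p
    rcases eq_or_ne a x with rfl | h1
    · simp
    · rcases eq_or_ne a w with rfl | h2
      · simp [h1]
      · simp [h1, h2]
  unfold lrItems
  rw [List.map_append, List.map_append, List.map_map]
  rw [List.map_append, List.map_append, hKmap]
  have h4x : List.map Prod.fst (if (L.map Prod.fst).contains x = true then ([] : List (Int × List Int)) else [(x, [w])])
      = (if (L.map Prod.fst).contains x = true then [] else [x]) := by split_ifs <;> simp
  have h4w : List.map Prod.fst (if (L.map Prod.fst).contains w = true then ([] : List (Int × List Int)) else [(w, [x])])
      = (if (L.map Prod.fst).contains w = true then [] else [w]) := by split_ifs <;> simp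
  rw [h4x, h4w]
  have h5 : ((L.map Prod.fst) ++ ((if (L.map Prod.fst).contains x = true then [] else [x])
      ++ (if (L.map Prod.fst).contains w = true then [] else [w]))).contains x = true := by
    rw [List.contains_iff_mem]
    rcases hx : (L.map Prod.fst).contains x with _ | _
    · refine List.mem_append_right _ (List.mem_append_left _ ?_)
      simp [hx]
    · exact List.mem_append_left _ (List.contains_iff_mem.1 hx)
  rw [if_pos h5]
  have h6 : R'.filter (fun u => !((L.map Prod.fst) ++ ((if (L.map Prod.fst).contains x = true then [] else [x])
      ++ (if (L.map Prod.fst).contains w = true then [] else [w]))).contains u)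
      = R'.filter (fun u => !(L.map Prod.fst).contains u) := by
    apply List.filter_congr
    intro u hu
    have hux : u ≠ x := fun e => hxR (e ▸ hu)
    have huw : u ≠ w := fun e => hwR (e ▸ hu)
    split_ifs <;> simp [hux, huw]
  rw [h6]
  have h1 : ∀ p : Int × List Int,
      ((fun p => if (p.1 == x) = true then (x, p.2 ++ List.filter (fun u => !p.2.contains u) R')
                 else if R'.contains p.1 = true then (p.1, PySem.Set.add p.2 x) else p) ∘
       (fun p => if (p.1 == x) = true then (x, PySem.Set.add p.2 w)
                 else if (p.1 == w) = true then (w, PySem.Set.add p.2 x) else p)) p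
      = (fun p => if (p.1 == x) = true then (x, p.2 ++ List.filter (fun u => !p.2.contains u) (w :: R'))
                  else if ((w :: R').contains p.1) = true then (p.1, PySem.Set.add p.2 x) else p) p := by
    intro p
    obtain ⟨a, s⟩ := p
    simp only [Function.comp_apply]
    rcases eq_or_ne a x with rfl | hax
    · rw [if_pos (by simp), if_pos (by simp), if_pos (by simp)]
      dsimp only
      have hfil : R'.filter (fun u => !List.contains (PySem.Set.add s w) u)
          = R'.filter (fun u => !s.contains u) := by
        apply List.filter_congr
        intro u hu
        have huw : u ≠ w := fun e => hwR (e ▸ hu)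
        rcases hus : s.contains u with _ | _
        · have : u ∉ PySem.Set.add s w := by
            rw [PySem.Set.mem_add]
            rintro (h | h)
            · rw [← List.contains_iff_mem] at h; rw [h] at hus; cases hus
            · exact huw h
          simp [this, hus]
        · have : u ∈ PySem.Set.add s w := PySem.Set.mem_add s w u |>.2 (Or.inl (by rwa [← List.contains_iff_mem]))
          simp [this, hus]
      rw [hfil, add_eq_append_filter, List.filter_cons, List.append_assoc]
      conv_rhs => rw [List.filter_cons]
      by_cases hsw : w ∈ s <;> simp [hsw]
    · rcases eq_or_ne a w with rfl | haw
      · have e1 : ((a : Int) == x) = false := by simp [hax]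
        have e2 : ((a : Int) == a) = true := by simp
        have e3 : (R'.contains a) = false := by
          rcases h : R'.contains a with _ | _
          · rfl
          · exact absurd (List.contains_iff_mem.1 h) hwR
        have e4 : ((a :: R').contains a) = true := List.contains_iff_mem.2 (by simp)
        simp only [e1, Bool.false_eq_true, if_false, e2, if_true, e3, e4]
      · have e1 : ((a : Int) == x) = false := by simp [hax]
        have e2 : ((a : Int) == w) = false := by simp [haw]
        have e5 : ((w :: R').contains a) = (R'.contains a) := by
          rcases h : R'.contains a with _ | _
          · rcases h2 : ((w :: R').contains a) with _ | _
            · rfl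
            · have := List.contains_iff_mem.1 h2
              rcases List.mem_cons.1 this with rfl | hm
              · exact absurd rfl haw
              · rw [← List.contains_iff_mem] at hm; rw [hm] at h; cases h
          · exact List.contains_iff_mem.2 (List.mem_cons_of_mem _ (List.contains_iff_mem.1 h))
        simp only [e1, e2, Bool.false_eq_true, if_false, e5]
  rw [List.map_congr_left (fun p _ => h1 p)]
  have h2 : List.map (fun p => if (p.1 == x) = true then (x, p.2 ++ List.filter (fun u => !p.2.contains u) R')
                 else if R'.contains p.1 = true then (p.1, PySem.Set.add p.2 x) else p)
      (if (L.map Prod.fst).contains x = true then ([] : List (Int × List Int)) else [(x, [w])])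
      = (if (L.map Prod.fst).contains x = true then [] else [(x, w :: R')]) := by
    split_ifs with h
    · simp
    · simp only [List.map_cons, List.map_nil]
      rw [if_pos (by simp)]
      have : R'.filter (fun u => !([w] : List Int).contains u) = R' := by
        rw [List.filter_eq_self]
        intro u hu
        have huw : u ≠ w := fun e => hwR (e ▸ hu)
        simp [huw]
      rw [this]
      rfl
  have h3 : List.map (fun p => if (p.1 == x) = true then (x, p.2 ++ List.filter (fun u => !p.2.contains u) R')
                 else if R'.contains p.1 = true then (p.1, PySem.Set.add p.2 x) else p)
      (if (L.map Prod.fst).contains w = true then ([] : List (Int × List Int)) else [(w, [x])])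
      = (if (L.map Prod.fst).contains w = true then [] else [(w, [x])]) := by
    split_ifs with h
    · simp
    · simp only [List.map_cons, List.map_nil]
      rw [if_neg (by simp [Ne.symm hxw]), if_neg (by simp [hwR])]
  rw [h2, h3]
  have h7 : (w :: R').filter (fun u => !(L.map Prod.fst).contains u)
      = (if (L.map Prod.fst).contains w = true then [] else [w])
        ++ R'.filter (fun u => !(L.map Prod.fst).contains u) := by
    rw [List.filter_cons]
    rcases hw : (L.map Prod.fst).contains w with _ | _ <;> simp [hw]
  rw [h7, List.map_append]
  have h8 : List.map (fun u => (u, ([x] : List Int))) (if (L.map Prod.fst).contains w = true then [] else [w])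
      = (if (L.map Prod.fst).contains w = true then [] else [(w, [x])]) := by
    split_ifs <;> simp
  rw [h8]
  simp [List.append_assoc]

theorem linkRow_items (x : Int) :
    ∀ (R : List Int) (d : PySem.Dict Int (List Int)), R.Nodup → x ∉ R → d.keys.Nodup → R ≠ [] →
      (linkRow x R d).items = lrItems x R d.items := by
  intro R
  induction R with
  | nil => intro d _ _ _ h; exact absurd rfl h
  | cons w R' ih =>
    intro d hnd hx hk _
    have hxw : x ≠ w := fun e => hx (by simp [e])
    have hstep : linkRow x (w :: R') d = linkRow x R' (pairStep d x w) := rfl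
    rcases eq_or_ne R' [] with rfl | hR'
    · rw [hstep]
      exact pairStep_items_eq_lr d x w hxw hk
    · rw [hstep, ih (pairStep d x w) hnd.of_cons (fun h => hx (List.mem_cons_of_mem _ h))
            (nodup_keys_pairStep d x w hk) hR']
      have hwR' : w ∉ R' := by
        simp only [List.nodup_cons] at hnd; exact hnd.1
      have hxR' : x ∉ R' := fun h => hx (List.mem_cons_of_mem _ h)
      have hitems := items_pairStep d x w hxw hk
      rw [contains_eq_keys_contains d x, contains_eq_keys_contains d w] at hitems
      rw [hitems]
      exact lr_combine x w R' hxw hxR' hwR' d.items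

theorem filter_to_R (x : Int) (Dt : List Int) (q r : Int → Bool)
    (h : ∀ w ∈ Dt, q w = ((w != x) && r w)) :
    Dt.filter q = (Dt.filter (fun w => w != x)).filter r := by
  rw [List.filter_filter]
  apply List.filter_congr
  intro a ha
  rw [h a ha]
  cases hr : r a <;> cases hx : (a != x) <;> simp [hr, hx]

theorem nf_lr (x : Int) (Dt : List Int) (hDt : Dt.Nodup)
    (hRne : Dt.filter (fun w => w != x) ≠ []) (L : List (Int × List Int)) :
    nfItemsQ Dt Dt (lrItems x (Dt.filter (fun w => w != x)) L)
      = nfItemsQ (x :: Dt.filter (fun w => w != x)) (x :: Dt.filter (fun w => w != x)) L := by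
  set R := Dt.filter (fun w => w != x) with hR
  set K := L.map Prod.fst with hK
  have hmemR : ∀ w, w ∈ R ↔ (w ∈ Dt ∧ w ≠ x) := by
    intro w; rw [hR, List.mem_filter]; simp
  have hxR : x ∉ R := fun h => ((hmemR x).1 h).2 rfl
  have hkeysLR : (lrItems x R L).map Prod.fst
      = K ++ ((if K.contains x then [] else [x]) ++ R.filter (fun u => !K.contains u)) := by
    unfold lrItems
    rw [List.map_append, List.map_append, List.map_map]
    congr 1
    · rw [hK]
      refine List.map_congr_left (fun p _ => ?_)
      obtain ⟨a, s⟩ := p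
      rcases eq_or_ne a x with rfl | h1
      · simp
      · simp [h1]
        split_ifs <;> rfl
    · congr 1
      · split_ifs <;> simp
      · rw [List.map_map]
        exact (List.map_congr_left (fun a _ => rfl)).trans (List.map_id _)
  have hfreshDt : Dt.filter (fun k => !((lrItems x R L).map Prod.fst).contains k) = [] := by
    rw [hkeysLR]
    rw [List.filter_eq_nil_iff]
    intro k hkDt
    have hnot : ∀ (l : List Int) (u : Int), l.contains u = false → u ∉ l := by
      intro l u h hm
      rw [← List.contains_iff_mem] at hm; rw [hm] at h; cases h
    simp only [Bool.not_eq_true', Bool.not_eq_false]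
    rw [List.contains_append]
    rcases eq_or_ne k x with rfl | hkx
    · rcases hKx : K.contains k with _ | _
      · rw [List.contains_append]
        have h1 : k ∉ K := hnot _ _ hKx
        simp [hKx, h1]
      · simp [hKx]
    · have hkR : k ∈ R := (hmemR k).2 ⟨hkDt, hkx⟩
      rcases hKk : K.contains k with _ | _
      · rw [List.contains_append]
        have hmm : k ∈ R.filter (fun u => !K.contains u) := List.mem_filter.2 ⟨hkR, by simp [hnot K k hKk]⟩
        rw [← List.contains_iff_mem] at hmm
        simp [hmm, hkR]
        first
          | exact hnot _ _ hKk
          | exact Or.inr (hnot _ _ hKk)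
      · simp [hKk]
  have hnot : ∀ (l : List Int) (u : Int), l.contains u = false → u ∉ l := by
    intro l u h hm
    rw [← List.contains_iff_mem] at hm; rw [hm] at h; cases h
  unfold nfItemsQ
  rw [hfreshDt, List.map_nil, List.append_nil]
  unfold lrItems
  rw [List.map_append, List.map_append]
  -- entrywise on L
  have hentry : ∀ p : Int × List Int,
      (keyUpdQ Dt Dt ∘ fun p => if (p.1 == x) = true then (x, p.2 ++ R.filter (fun w => !p.2.contains w))
          else if R.contains p.1 = true then (p.1, PySem.Set.add p.2 x) else p) p
        = keyUpdQ (x :: R) (x :: R) p := by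
    intro p
    obtain ⟨a, s⟩ := p
    simp only [Function.comp_apply]
    rcases eq_or_ne a x with rfl | hax
    · rw [if_pos (by simp : ((a : Int) == a) = true)]
      unfold keyUpdQ
      dsimp only
      rw [if_pos (show a ∈ a :: R by simp)]
      have hfR : List.filter (fun w => w != a && !(List.contains s w)) (a :: R) = R.filter (fun u => !s.contains u) := by
        rw [List.filter_cons]
        have h0 : ((a != a) && !(List.contains s a)) = false := by simp
        simp only [h0, Bool.false_eq_true, if_false]
        apply List.filter_congr
        intro u hu
        have hua : u ≠ a := ((hmemR u).1 hu).2
        simp [hua]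
      have hval : List.filter (fun w => w != a && !(List.contains (s ++ List.filter (fun u => !s.contains u) R) w)) Dt = [] := by
        rw [List.filter_eq_nil_iff]
        intro w hw
        by_cases hwa : w = a
        · simp [hwa]
        · have hwR : w ∈ R := (hmemR w).2 ⟨hw, hwa⟩
          have hcc : w ∈ s ++ List.filter (fun u => !s.contains u) R := by
            by_cases hws : w ∈ s
            · exact List.mem_append_left _ hws
            · exact List.mem_append_right _ (List.mem_filter.2 ⟨hwR, by simp [hws]⟩)
          rw [List.contains_iff_mem.2 hcc]
          simp
      by_cases haDt : a ∈ Dt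
      · rw [if_pos haDt, hval, List.append_nil, hfR]
      · rw [if_neg haDt, hfR]
    · rw [if_neg (by simp [hax])]
      rcases hRa : R.contains a with _ | _
      · have haR : a ∉ R := hnot _ _ hRa
        have haDt : a ∉ Dt := fun h => haR ((hmemR a).2 ⟨h, hax⟩)
        simp only [Bool.false_eq_true, if_false]
        unfold keyUpdQ
        dsimp only
        rw [if_neg haDt, if_neg (by simp [hax, haR] : ¬ a ∈ x :: R)]
      · rw [if_pos rfl]
        have haR : a ∈ R := List.contains_iff_mem.1 hRa
        have haDt : a ∈ Dt := ((hmemR a).1 haR).1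
        unfold keyUpdQ
        dsimp only
        rw [if_pos haDt, if_pos (show a ∈ x :: R by simp [haR])]
        have hflt : List.filter (fun w => w != a && !(List.contains (PySem.Set.add s x) w)) Dt
            = R.filter (fun w => w != a && !(List.contains s w)) := by
          rw [hR]
          apply filter_to_R
          intro w hw
          by_cases hwx : w = x
          · have : List.contains (PySem.Set.add s x) w = true :=
              List.contains_iff_mem.2 ((PySem.Set.mem_add s x w).2 (Or.inr hwx))
            simp [this, hwx]
          · have : List.contains (PySem.Set.add s x) w = List.contains s w := by
              rcases hws : List.contains s w with _ | _
              · rw [Bool.eq_false_iff]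
                intro hc
                rcases (PySem.Set.mem_add s x w).1 (List.contains_iff_mem.1 hc) with h | h
                · exact hnot _ _ hws h
                · exact hwx h
              · exact List.contains_iff_mem.2 ((PySem.Set.mem_add s x w).2 (Or.inl (List.contains_iff_mem.1 hws)))
            simp [this, hwx]
        have hxa : ((x != a) && !(List.contains s x)) = (!(List.contains s x)) := by
          simp [Ne.symm hax]
        rw [hflt, List.filter_cons, hxa, add_eq_append_filter, List.filter_cons, List.append_assoc]
        by_cases hsx : x ∈ s <;> simp [hsx]
  rw [List.map_map, List.map_congr_left (fun (p : Int × List Int) _ => hentry p)]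
  have hEx : List.map (keyUpdQ Dt Dt) (if K.contains x then [] else [(x, R)])
      = (if K.contains x then [] else [(x, R)]) := by
    split_ifs
    · rfl
    · simp only [List.map_cons, List.map_nil]
      unfold keyUpdQ
      dsimp only
      by_cases hxDt : x ∈ Dt
      · rw [if_pos hxDt]
        have h0 : Dt.filter (fun w => w != x && !(List.contains R w)) = [] := by
          rw [List.filter_eq_nil_iff]
          intro w hw
          by_cases hwx : w = x
          · simp [hwx]
          · have : w ∈ R := (hmemR w).2 ⟨hw, hwx⟩
            rw [List.contains_iff_mem.2 this]
            simp
        rw [h0, List.append_nil]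
      · rw [if_neg hxDt]
  have hFr : List.map (keyUpdQ Dt Dt) ((R.filter (fun w => !K.contains w)).map (fun w => (w, [x])))
      = (R.filter (fun w => !K.contains w)).map (fun u => (u, x :: R.filter (fun w => w != u))) := by
    rw [List.map_map]
    refine List.map_congr_left (fun u hu => ?_)
    have huR : u ∈ R := (List.mem_filter.1 hu).1
    have huDt : u ∈ Dt := ((hmemR u).1 huR).1
    have hux : u ≠ x := ((hmemR u).1 huR).2
    simp only [Function.comp_apply]
    unfold keyUpdQ
    dsimp only
    rw [if_pos huDt]
    have h1 : Dt.filter (fun w => w != u && !(List.contains [x] w)) = R.filter (fun w => w != u) := by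
      rw [hR]
      apply filter_to_R
      intro w hw
      by_cases hwx : w = x
      · simp [hwx]
      · have h2 : List.contains [x] w = false := by
          rcases h : List.contains [x] w with _ | _
          · rfl
          · have := List.contains_iff_mem.1 h
            simp at this
            exact absurd this hwx
        simp [h2, hwx]
    rw [h1]
    rfl
  have hDfresh : ((x :: R).filter (fun k => !K.contains k)).map (fun k => (k, (x :: R).filter (fun w => w != k)))
      = (if K.contains x then [] else [(x, R)])
        ++ (R.filter (fun w => !K.contains w)).map (fun u => (u, x :: R.filter (fun w => w != u))) := by
    have htail : ∀ (l : List Int), (∀ u ∈ l, u ∈ R) →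
        l.map (fun k => (k, (x :: R).filter (fun w => w != k)))
          = l.map (fun u => (u, x :: R.filter (fun w => w != u))) := by
      intro l hl
      refine List.map_congr_left (fun u hu => ?_)
      have hux : u ≠ x := ((hmemR u).1 (hl u hu)).2
      rw [List.filter_cons]
      have : (x != u) = true := by simp [Ne.symm hux]
      rw [this, if_pos rfl]
    rw [List.filter_cons]
    rcases hKx : K.contains x with _ | _
    · rw [if_pos (show (!false) = true from rfl), List.map_cons]
      simp only [Bool.false_eq_true, if_false]
      show _ = [(x, R)] ++ _
      rw [List.singleton_append]
      congr 1
      · rw [List.filter_cons]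
        have h3 : (x != x) = false := by simp
        simp only [h3, Bool.false_eq_true, if_false]
        congr 1
        rw [List.filter_eq_self]
        intro u hu
        simp [((hmemR u).1 hu).2]
      · exact htail _ (fun u hu => (List.mem_filter.1 hu).1)
    · rw [if_neg (by simp), if_pos (show (true : Bool) = true from rfl), List.nil_append]
      exact htail _ (fun u hu => (List.mem_filter.1 hu).1)
  rw [hEx, hFr, hDfresh]

theorem nf_singleton (u : Int) (L : List (Int × List Int)) (h : u ∈ L.map Prod.fst) :
    nfItemsQ [u] [u] L = L := by
  unfold nfItemsQ
  have h1 : ∀ p ∈ L, keyUpdQ [u] [u] p = id p := by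
    intro p _
    obtain ⟨a, s⟩ := p
    unfold keyUpdQ
    dsimp only
    by_cases hau : a ∈ ([u] : List Int)
    · rw [if_pos hau]
      simp only [List.mem_singleton] at hau
      subst hau
      have h0 : (([a] : List Int).filter (fun w => w != a && !(List.contains s w))) = [] := by
        simp
      rw [h0, List.append_nil]
      rfl
    · rw [if_neg hau]
      rfl
  rw [List.map_congr_left h1, List.map_id]
  have h2 : ([u] : List Int).filter (fun k => !((L.map Prod.fst).contains k)) = [] := by
    rw [List.filter_eq_nil_iff]
    intro w hw
    simp only [List.mem_singleton] at hw
    subst hw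
    rw [List.contains_iff_mem.2 h]
    simp
  rw [h2]
  simp

theorem contains_pairStep_mono (d : PySem.Dict Int (List Int)) (a b u : Int)
    (h : d.contains u = true) : (pairStep d a b).contains u = true := by
  rcases eq_or_ne a b with rfl | hab
  · rwa [pairStep_self]
  · rw [contains_pairStep d a b hab u, h]
    simp

theorem contains_linkRow_mono (x : Int) :
    ∀ (R : List Int) (d : PySem.Dict Int (List Int)) (u : Int),
      d.contains u = true → (linkRow x R d).contains u = true := by
  intro R
  induction R with
  | nil => intro d u h; exact h
  | cons w R' ih => intro d u h; exact ih _ u (contains_pairStep_mono d x w u h)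

theorem contains_linkRow (x : Int) :
    ∀ (R : List Int) (d : PySem.Dict Int (List Int)) (u : Int), u ∈ R → x ∉ R →
      (linkRow x R d).contains u = true := by
  intro R
  induction R with
  | nil => intro d u h _; cases h
  | cons w R' ih =>
    intro d u h hx
    have hxw : x ≠ w := fun e => hx (by simp [e])
    rcases List.mem_cons.1 h with rfl | hm
    · exact contains_linkRow_mono x R' (pairStep d x u) u
        (by rw [contains_pairStep d x u hxw u]; simp)
    · exact ih (pairStep d x w) u hm (fun hh => hx (List.mem_cons_of_mem _ hh))

theorem nodup_all_eq (Dt : List Int) (x : Int) (hn : Dt.Nodup) (h : ∀ w ∈ Dt, w = x) :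
    Dt = [] ∨ Dt = [x] := by
  match Dt, hn, h with
  | [], _, _ => exact Or.inl rfl
  | [a], _, h => exact Or.inr (by rw [h a (by simp)])
  | a :: b :: t, hn, h =>
    exfalso
    have ha := h a (by simp)
    have hb := h b (by simp)
    simp only [List.nodup_cons, List.mem_cons] at hn
    exact hn.1 (Or.inl (ha.trans hb.symm))

theorem stepB_singleton_self (u : Int) (d : PySem.Dict Int (List Int)) :
    stepB [u] d u = d := by
  unfold stepB
  have h0 : (([u] : List Int).filter (fun w => w != u)) = [] := by simp
  rw [h0]
  rfl

theorem linkG_eq (l : List Int) :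
    ∀ (d : PySem.Dict Int (List Int)), d.keys.Nodup →
      linkG l d = (PySem.List.dedup l).foldl (stepB (PySem.List.dedup l)) d := by
  induction l with
  | nil => intro d _; rfl
  | cons x t ih =>
    intro d hk
    have hded : PySem.List.dedup (x :: t)
        = x :: (PySem.List.dedup t).filter (fun w => w != x) := by
      rw [show PySem.List.dedup (x :: t) = x :: PySem.Set.discard (PySem.List.dedup t) x from by
        simp [PySem.Set.ofList_cons]]
      rfl
    have hDtn : (PySem.List.dedup t).Nodup := PySem.List.nodup_dedup t
    have hkLR : (linkRow x ((PySem.List.dedup t).filter (fun w => w != x)) d).keys.Nodup :=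
      nodup_keys_linkRow x _ d hk
    show linkG t (linkRow x ((PySem.List.dedup t).filter (fun w => w != x)) d) = _
    rw [ih _ hkLR]
    rcases eq_or_ne ((PySem.List.dedup t).filter (fun w => w != x)) [] with hRe | hRne
    · -- no partner distinct from x in t
      have hall : ∀ w ∈ PySem.List.dedup t, w = x := by
        intro w hw
        by_contra hne
        have : w ∈ (PySem.List.dedup t).filter (fun w => w != x) :=
          List.mem_filter.2 ⟨hw, by simp [hne]⟩
        rw [hRe] at this
        cases this
      rw [hRe]
      rcases nodup_all_eq _ x hDtn hall with hDt | hDt <;> rw [hded, hRe, hDt]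
      · rw [List.foldl_nil, List.foldl_cons, List.foldl_nil, stepB_singleton_self]
        rfl
      · rw [List.foldl_cons, List.foldl_nil, List.foldl_cons, List.foldl_nil,
            stepB_singleton_self, stepB_singleton_self]
        rfl
    · have hxRn : x ∉ (PySem.List.dedup t).filter (fun w => w != x) := by
        intro h
        have := (List.mem_filter.1 h).2
        simp at this
      have hRn : ((PySem.List.dedup t).filter (fun w => w != x)).Nodup := hDtn.filter _
      have hA : (PySem.List.dedup t).foldl (stepB (PySem.List.dedup t))
            (linkRow x ((PySem.List.dedup t).filter (fun w => w != x)) d)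
          = PySem.Dict.mk (nfItemsQ (PySem.List.dedup t) (PySem.List.dedup t)
              (linkRow x ((PySem.List.dedup t).filter (fun w => w != x)) d).items) := by
        rcases h2 : PySem.List.dedup t with _ | ⟨u, rest⟩
        · exfalso; rw [h2] at hRne; exact hRne rfl
        rcases rest with _ | ⟨u2, rest2⟩
        · -- a single distinct value in t
          have hux : u ≠ x := by
            intro e
            rw [h2, e] at hRne
            simp at hRne
          have hRu : List.filter (fun w => w != x) [u] = [u] := by
            rw [List.filter_cons]
            have h3 : (u != x) = true := by simp [hux]
            rw [h3, if_pos rfl]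
            rfl
          rw [hRu, List.foldl_cons, List.foldl_nil, stepB_singleton_self]
          have hc := contains_linkRow x [u] d u (by simp) (by simp [Ne.symm hux])
          rw [contains_eq_keys_contains] at hc
          rw [nf_singleton u _ (List.contains_iff_mem.1 hc)]
        · -- at least two distinct values in t
          rw [← h2]
          refine fold_nf _ hDtn ?_ _ _ hDtn (fun v hv => hv) hkLR
          rw [h2]
          simp only [List.length_cons]
          omega
      rw [hA, linkRow_items x _ d hRn hxRn hk hRne, nf_lr x _ hDtn hRne d.items, hded]
      have hlen : 2 ≤ (x :: (PySem.List.dedup t).filter (fun w => w != x)).length := by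
        rcases hR2 : (PySem.List.dedup t).filter (fun w => w != x) with _ | ⟨a, b⟩
        · exact absurd hR2 hRne
        · simp only [List.length_cons]; omega
      rw [fold_nf _ (List.nodup_cons.2 ⟨hxRn, hRn⟩) hlen _ d
            (List.nodup_cons.2 ⟨hxRn, hRn⟩) (fun v hv => hv) hk]

theorem build_final (arestas : List Int) (adj : List (Int × List Int))
    (h1 : arestas ≠ []) (h2 : (adj.map Prod.fst).Nodup) :
    build_aux arestas adj = build_aux_alt arestas adj := by
  unfold build_aux build_aux_alt
  by_cases hlen : 1 < (arestas.length : Int)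
  · rw [if_pos hlen, if_pos hlen]
    have hk : (PySem.Dict.mk adj).keys.Nodup := h2
    congr 1
    have hA := A_bridge arestas (arestas.length) 0 (PySem.Dict.mk adj) (by omega) hk
    rw [Nat.cast_zero, List.drop_zero] at hA
    rw [hA]
    have hB : (fun (d : PySem.Dict Int (List Int)) (v : Int) =>
        let others := (PySem.List.dedup arestas).filter (fun w => w != v)
        if others.isEmpty then d
        else PySem.Dict.modify (PySem.Dict.setdefault d v []) v []
              (fun s => PySem.Set.update s others)) = stepB (PySem.List.dedup arestas) := rfl
    rw [hB]
    exact linkG_eq arestas (PySem.Dict.mk adj) hk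
  · rw [if_neg hlen, if_neg hlen]

-- ===== VERDICT (by name: the statement is the Claim_ definition above) =====
theorem build_aux_spec : Claim_equal_build_aux := by
  intro arestas adj _ hpre
  unfold Spec_build_aux
  exact build_final arestas adj hpre.1 hpre.2
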